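-- pv_equiv track=rewrite | github.com/MacGyver1618/advent-of-code | 2017/python/advent_24.py | find_bridges
-- ===== SOURCE A (Python) =====
-- def look_for(port, bag):
--     return [comp for comp in bag if port in comp]
--
-- def find_bridges(bridge_so_far, looking_for, remaining):
--     candidates = look_for(looking_for, remaining)
--     if not candidates:
--         yield bridge_so_far
--     for cand in candidates:
--         bridge=bridge_so_far+[cand]
--         next_to_find=cand[1] if cand[0] == looking_for else cand[0]
--         remaining_after=[other for other in remaining if other!=cand]
--         yield from find_bridges(bridge, next_to_find, remaining_after)
-- ===== SOURCE B (Python) =====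
-- def find_bridges(bridge_so_far, looking_for, remaining):
--     # Iterative DFS with an explicit stack instead of recursion; same pre-order
--     # yield sequence (children pushed in reversed order so they pop in order).
--     stack = [(bridge_so_far, looking_for, remaining)]
--     while stack:
--         bridge, port, rem = stack.pop()
--         cands = [c for c in rem if port in c]
--         if not cands:
--             yield bridge
--         else:
--             stack.extend((bridge + [c],
--                           c[1] if c[0] == port else c[0],
--                           [o for o in rem if o != c])
--                          for c in reversed(cands))
-- ===== Notes on version B (the rewrite author's own statement) =====
-- stated objective: alternative
-- what changed: Replaces the recursive generator (yield from on each candidate) with an iterative depth-first search over an explicit stack of (bridge, port, remaining) states, pushing children in reversed order so the yield sequence preserves A's pre-order.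
import Mathlib
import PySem

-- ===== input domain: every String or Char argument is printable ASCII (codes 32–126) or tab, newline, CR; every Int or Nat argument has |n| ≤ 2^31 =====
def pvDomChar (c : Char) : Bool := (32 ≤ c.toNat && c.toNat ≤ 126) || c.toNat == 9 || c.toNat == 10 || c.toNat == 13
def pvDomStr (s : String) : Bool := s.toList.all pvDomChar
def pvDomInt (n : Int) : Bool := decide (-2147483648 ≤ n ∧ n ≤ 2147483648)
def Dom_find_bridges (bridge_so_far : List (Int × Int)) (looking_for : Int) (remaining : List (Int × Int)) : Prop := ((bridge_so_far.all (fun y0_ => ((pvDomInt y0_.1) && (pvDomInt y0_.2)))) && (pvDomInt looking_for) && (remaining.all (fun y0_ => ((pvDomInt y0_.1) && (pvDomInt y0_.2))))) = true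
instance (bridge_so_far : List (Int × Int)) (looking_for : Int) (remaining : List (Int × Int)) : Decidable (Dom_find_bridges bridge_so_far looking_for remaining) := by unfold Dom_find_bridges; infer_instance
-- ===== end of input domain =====

-- B replaces the recursive generator with an iterative DFS over an explicit stack
-- (children pushed in reversed order to preserve A's pre-order); objective: alternative.


-- removing an element that is present strictly shrinks a list (cited by both ports' termination proofs)
theorem pv_remove_lt (rem : List (Int × Int)) (c : Int × Int) (hmem : c ∈ rem) :
    (rem.filter (fun o => decide (o ≠ c))).length < rem.length :=
  List.length_filter_lt_length_iff_exists.mpr ⟨c, hmem, by simp⟩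

-- ===== PORT A =====
-- look_for(port, bag): [comp for comp in bag if port in comp]
def look_for (port : Int) (bag : List (Int × Int)) : List (Int × Int) :=
  bag.filter (fun comp => port == comp.1 || port == comp.2)

-- `.attach` only supplies the membership fact the termination argument needs; the computation is A's.
def find_bridges (bridge_so_far : List (Int × Int)) (looking_for : Int) (remaining : List (Int × Int)) : List (List (Int × Int)) :=
  let candidates := look_for looking_for remaining
  if candidates = [] then
    [bridge_so_far]
  else
    candidates.attach.flatMap (fun ⟨cand, hc⟩ =>
      let bridge := bridge_so_far ++ [cand]
      let next_to_find := if cand.1 == looking_for then cand.2 else cand.1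
      let remaining_after := remaining.filter (fun other => decide (other ≠ cand))
      find_bridges bridge next_to_find remaining_after)
termination_by remaining.length
decreasing_by
  have hmem : cand ∈ remaining :=
    (List.mem_filter.mp (show cand ∈
      List.filter (fun comp => looking_for == comp.1 || looking_for == comp.2) remaining from hc)).1
  have hlt : (List.filter (fun x => decide ((x : {a // a ∈ remaining}).1 ≠ cand)) remaining.attach).length
      < remaining.attach.length :=
    List.length_filter_lt_length_iff_exists.mpr ⟨⟨cand, hmem⟩, List.mem_attach _ _, by simp⟩
  simpa using hlt

-- ===== PORT B =====
-- termination weight for the stack: pvW n bounds the work of a state with n remaining pieces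
def pvW : Nat → Nat
  | 0 => 1
  | n + 1 => (n + 1) * pvW n + 1

theorem pvW_pos (n : Nat) : 1 ≤ pvW n := by
  cases n with
  | zero => simp [pvW]
  | succ m => simp [pvW]

theorem pvW_mono {a b : Nat} (hab : a ≤ b) : pvW a ≤ pvW b := by
  induction hab with
  | refl => exact Nat.le_refl _
  | @step k _ ih =>
    refine Nat.le_trans ih ?_
    show pvW k ≤ (k + 1) * pvW k + 1
    nlinarith [pvW_pos k]

def pvStackMeasure (stack : List ((List (Int × Int)) × Int × List (Int × Int))) : Nat :=
  (stack.map (fun s => pvW s.2.2.length)).sum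

-- the child states pushed for one popped state (Source B's generator expression over reversed(cands);
-- top of stack = head of the list, so pushing in reversed order = prepending in forward order)
def pvChildren (bridge : List (Int × Int)) (port : Int) (rem : List (Int × Int)) :
    List ((List (Int × Int)) × Int × List (Int × Int)) :=
  (rem.filter (fun c => port == c.1 || port == c.2)).map (fun c =>
    (bridge ++ [c],
     if c.1 == port then c.2 else c.1,
     rem.filter (fun o => decide (o ≠ c))))

-- the children of a state weigh strictly less than the state itself (cited by pvAltLoop's termination)
theorem pvChildren_measure (bridge : List (Int × Int)) (port : Int) (rem : List (Int × Int))
    (h : rem.filter (fun c => port == c.1 || port == c.2) ≠ []) :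
    pvStackMeasure (pvChildren bridge port rem) < pvW rem.length := by
  have hrem : rem ≠ [] := fun hnil => by simp [hnil] at h
  obtain ⟨m, hm⟩ : ∃ m, rem.length = m + 1 := by
    cases hl : rem.length with
    | zero => exact absurd (List.length_eq_zero_iff.mp hl) hrem
    | succ n => exact ⟨n, rfl⟩
  have hsum : pvStackMeasure (pvChildren bridge port rem)
      ≤ (rem.filter (fun c => port == c.1 || port == c.2)).length * pvW m := by
    have heq : pvStackMeasure (pvChildren bridge port rem)
        = ((rem.filter (fun c => port == c.1 || port == c.2)).map
            (fun c => pvW (rem.filter (fun o => decide (o ≠ c))).length)).sum := by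
      simp [pvStackMeasure, pvChildren, List.map_map, Function.comp_def]
    rw [heq]
    have hle : ∀ v ∈ (rem.filter (fun c => port == c.1 || port == c.2)).map
        (fun c => pvW (rem.filter (fun o => decide (o ≠ c))).length), v ≤ pvW m := by
      intro v hv
      simp only [List.mem_map] at hv
      obtain ⟨c, hc, rfl⟩ := hv
      apply pvW_mono
      have := pv_remove_lt rem c (List.mem_filter.mp hc).1
      omega
    simpa [smul_eq_mul] using List.sum_le_card_nsmul _ (pvW m) hle
  have hcle : (rem.filter (fun c => port == c.1 || port == c.2)).length ≤ rem.length :=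
    List.length_filter_le _ _
  have hfin : (rem.filter (fun c => port == c.1 || port == c.2)).length * pvW m < pvW rem.length := by
    rw [hm]; simp only [pvW]
    nlinarith [pvW_pos m, hcle, hm]
  omega

theorem pvStackMeasure_append (xs ys : List ((List (Int × Int)) × Int × List (Int × Int))) :
    pvStackMeasure (xs ++ ys) = pvStackMeasure xs + pvStackMeasure ys := by
  simp [pvStackMeasure]

-- the iterative DFS loop: pop a state, emit at a dead end, else push its children
def pvAltLoop (stack : List ((List (Int × Int)) × Int × List (Int × Int))) : List (List (Int × Int)) :=
  match stack with
  | [] => []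
  | (bridge, port, rem) :: rest =>
    if rem.filter (fun c => port == c.1 || port == c.2) = [] then
      bridge :: pvAltLoop rest
    else
      pvAltLoop (pvChildren bridge port rem ++ rest)
termination_by pvStackMeasure stack
decreasing_by
  · simp only [pvStackMeasure, List.map_cons, List.sum_cons]
    have := pvW_pos rem.length
    omega
  · rename_i h
    simp only [List.unattach_filter, List.unattach_attach] at h
    rw [pvStackMeasure_append]
    have := pvChildren_measure bridge port rem h
    simp only [pvStackMeasure, List.map_cons, List.sum_cons] at *
    omega

def find_bridges_alt (bridge_so_far : List (Int × Int)) (looking_for : Int) (remaining : List (Int × Int)) : List (List (Int × Int)) :=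
  pvAltLoop [(bridge_so_far, looking_for, remaining)]

-- ===== PRECONDITION & SPEC =====
def Spec_find_bridges (bridge_so_far : List (Int × Int)) (looking_for : Int) (remaining : List (Int × Int)) (out : List (List (Int × Int))) : Prop := out = find_bridges_alt bridge_so_far looking_for remaining
instance (bridge_so_far : List (Int × Int)) (looking_for : Int) (remaining : List (Int × Int)) (out : List (List (Int × Int))) : Decidable (Spec_find_bridges bridge_so_far looking_for remaining out) := by unfold Spec_find_bridges; infer_instance

-- ===== CLAIM (what is proved, stated in full; the proofs are below) =====
def Claim_equal_find_bridges : Prop := ∀ (bridge_so_far : List (Int × Int)) (looking_for : Int) (remaining : List (Int × Int)), Dom_find_bridges bridge_so_far looking_for remaining → Spec_find_bridges bridge_so_far looking_for remaining (find_bridges bridge_so_far looking_for remaining)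

-- ===== LEMMAS AND PROOFS =====

-- flatMap over an attached list factoring through the value
theorem pv_flatMap_attach {α β : Type} (l : List α) (f : α → List β) :
    l.attach.flatMap (fun x => f x.1) = l.flatMap f := by
  induction l with
  | nil => rfl
  | cons a t ih => simp [List.attach_cons, List.flatMap_cons, List.flatMap_map]

-- the stack loop computes, in order, the recursive results of the stacked states
theorem pvAltLoop_eq (stack : List ((List (Int × Int)) × Int × List (Int × Int))) :
    pvAltLoop stack = stack.flatMap (fun s => find_bridges s.1 s.2.1 s.2.2) := by
  induction stack using pvAltLoop.induct with
  | case1 => simp [pvAltLoop]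
  | case2 bridge port rem rest h ih =>
    rw [pvAltLoop]
    simp only [List.unattach_filter, List.unattach_attach] at h
    simp only [List.flatMap_cons, ih]
    rw [find_bridges]
    simp [look_for, h]
  | case3 bridge port rem rest h ih =>
    rw [pvAltLoop]
    simp only [List.unattach_filter, List.unattach_attach] at h
    rw [if_neg h, ih, List.flatMap_cons]
    rw [show (find_bridges bridge port rem) = _ from find_bridges.eq_def bridge port rem]
    rw [if_neg (show ¬ look_for port rem = [] from by simpa [look_for] using h)]
    simp only [List.flatMap_append, pvChildren, List.flatMap_map, look_for]
    refine congrArg (· ++ List.flatMap (fun s => find_bridges s.1 s.2.1 s.2.2) rest) ?_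
    exact (pv_flatMap_attach _ (fun a => find_bridges (bridge ++ [a])
      (if (a.1 == port) = true then a.2 else a.1)
      (List.filter (fun o => decide (o ≠ a)) rem))).symm

-- ===== VERDICT (by name: the statement is the Claim_ definition above) =====
theorem find_bridges_spec : Claim_equal_find_bridges := by
  intro b lf rem _
  unfold Spec_find_bridges find_bridges_alt
  rw [pvAltLoop_eq]
  simp
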